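-- pv_equiv track=rewrite | github.com/rgtjf/Semantic-Texual-Similarity-Toolkits | stst/features.py | _feat_list_to_string
-- ===== SOURCE A (Python) =====
-- def _feat_list_to_string(feat_list):
--     """
--      [0, 1, 0, 1] => 2:1 4:1
--     """
--     feat_dict = {}
--
--     for index, item in enumerate(feat_list):
--         if item != 0:
--             feat_dict[index + 1] = item
--
--     transformed_list = [str(key) + ":" + str(feat_dict[key]) for key in sorted(feat_dict.keys())]
--     feat_string = " ".join(transformed_list)
--
--     return feat_string
-- ===== SOURCE B (Python) =====
-- def _feat_list_to_string(feat_list):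
--     return " ".join(str(i + 1) + ":" + str(v) for i, v in enumerate(feat_list) if v != 0)
-- ===== Notes on version B (the rewrite author's own statement) =====
-- stated objective: simpler
-- what changed: Drops the intermediate dict and the sort: one generator pass over enumerate(feat_list) emits the index:value tokens directly (they are already in increasing index order) and joins them.
import Mathlib
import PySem

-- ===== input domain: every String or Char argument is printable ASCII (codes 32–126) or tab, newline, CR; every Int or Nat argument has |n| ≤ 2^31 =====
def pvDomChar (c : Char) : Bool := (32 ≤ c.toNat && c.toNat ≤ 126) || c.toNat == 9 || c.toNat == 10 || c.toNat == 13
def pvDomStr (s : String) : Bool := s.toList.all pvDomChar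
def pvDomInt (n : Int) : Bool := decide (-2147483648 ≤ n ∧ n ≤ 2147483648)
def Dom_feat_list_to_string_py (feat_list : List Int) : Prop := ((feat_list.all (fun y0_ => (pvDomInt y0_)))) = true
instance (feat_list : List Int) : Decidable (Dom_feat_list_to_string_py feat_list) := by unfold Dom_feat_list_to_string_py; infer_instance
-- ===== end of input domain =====

-- B drops A's intermediate dict and sort: one pass over enumerate emits the tokens in index order (simpler; return value only).

-- ===== PORT A =====
-- feat_dict[key] is total here since key ∈ feat_dict.keys; getD _ 0 is exact on those keys.
def feat_list_to_string_py (feat_list : List Int) : String :=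
  let feat_dict : PySem.Dict Int Int :=
    (PySem.List.enumerate feat_list 0).foldl
      (fun d p => if p.2 ≠ 0 then d.insert (p.1 + 1) p.2 else d) PySem.Dict.empty
  let transformed_list :=
    (PySem.List.sorted feat_dict.keys (fun k => k) false).map
      (fun key => PySem.Int.toStr key ++ ":" ++ PySem.Int.toStr (feat_dict.getD key 0))
  PySem.Str.join " " transformed_list

-- ===== PORT B =====
def feat_list_to_string_py_alt (feat_list : List Int) : String :=
  PySem.Str.join " "
    (((PySem.List.enumerate feat_list 0).filter (fun p => p.2 ≠ 0)).map
      (fun p => PySem.Int.toStr (p.1 + 1) ++ ":" ++ PySem.Int.toStr p.2))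

-- ===== PRECONDITION & SPEC =====
def Spec_feat_list_to_string_py (feat_list : List Int) (out : String) : Prop := out = feat_list_to_string_py_alt feat_list
instance (feat_list : List Int) (out : String) : Decidable (Spec_feat_list_to_string_py feat_list out) := by unfold Spec_feat_list_to_string_py; infer_instance

-- ===== CLAIM (what is proved, stated in full; the proofs are below) =====
def Claim_equal_feat_list_to_string_py : Prop := ∀ (feat_list : List Int), Dom_feat_list_to_string_py feat_list → Spec_feat_list_to_string_py feat_list (feat_list_to_string_py feat_list)

-- ===== LEMMAS AND PROOFS =====

-- The dict A builds over pairs with strictly increasing (hence fresh) first components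
-- has exactly the filtered pairs, shifted by one, as its items.
theorem pv_items_foldl (l : List (Int × Int)) (d : PySem.Dict Int Int)
    (hl : l.Pairwise (fun p q => p.1 < q.1))
    (hd : ∀ p ∈ l, d.contains (p.1 + 1) = false) :
    (l.foldl (fun d p => if p.2 ≠ 0 then d.insert (p.1 + 1) p.2 else d) d).items
      = d.items ++ (l.filter (fun p => p.2 ≠ 0)).map (fun p => (p.1 + 1, p.2)) := by
  induction l generalizing d with
  | nil => simp
  | cons p l ih =>
    rw [List.pairwise_cons] at hl
    by_cases hz : p.2 ≠ 0
    · have hfresh := hd p (List.mem_cons_self)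
      rw [List.foldl_cons, List.filter_cons_of_pos (by simpa using hz)]
      simp only [if_pos hz]
      rw [ih _ hl.2 ?_, PySem.Dict.items_insert_of_not_contains _ _ hfresh]
      · simp
      · intro q hq
        rw [PySem.Dict.contains_insert]
        have h1 : p.1 < q.1 := hl.1 q hq
        have : (q.1 + 1 == p.1 + 1) = false := by
          simp only [beq_eq_false_iff_ne]; omega
        rw [this, hd q (List.mem_cons_of_mem _ hq)]
        rfl
    · rw [List.foldl_cons, List.filter_cons_of_neg (by simpa using hz)]
      simp only [if_neg hz]
      exact ih _ hl.2 (fun q hq => hd q (List.mem_cons_of_mem _ hq))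

theorem feat_list_to_string_py_spec_aux (feat_list : List Int) :
    feat_list_to_string_py feat_list = feat_list_to_string_py_alt feat_list := by
  unfold feat_list_to_string_py feat_list_to_string_py_alt
  set l := PySem.List.enumerate feat_list 0 with hl
  set d := l.foldl (fun d p => if p.2 ≠ 0 then d.insert (p.1 + 1) p.2 else d) PySem.Dict.empty with hd
  have hpl : l.Pairwise (fun p q => p.1 < q.1) := PySem.List.pairwise_lt_enumerate feat_list 0
  have hitems : d.items = (l.filter (fun p => p.2 ≠ 0)).map (fun p => (p.1 + 1, p.2)) := by
    rw [hd, pv_items_foldl l PySem.Dict.empty hpl (fun p _ => by simp [PySem.Dict.contains_empty])]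
    simp [PySem.Dict.empty]
  have hkeys : d.keys = (l.filter (fun p => p.2 ≠ 0)).map (fun p => p.1 + 1) := by
    show d.items.map (·.1) = _
    rw [hitems, List.map_map]; rfl
  have hkpl : d.keys.Pairwise (· < ·) := by
    rw [hkeys]
    refine List.Pairwise.map _ ?_ (hpl.filter _)
    intro a b h; omega
  have hnodup : d.keys.Nodup := hkpl.imp (fun h => by omega)
  have hsorted : PySem.List.sorted d.keys (fun k => k) false = d.keys :=
    PySem.List.sorted_eq_self_of_pairwise _ _ (hkpl.imp (fun h => le_of_lt h))
  simp only [hsorted]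
  congr 1
  calc d.keys.map (fun key => PySem.Int.toStr key ++ ":" ++ PySem.Int.toStr (d.getD key 0))
      = d.items.map (fun p => PySem.Int.toStr p.1 ++ ":" ++ PySem.Int.toStr (d.getD p.1 0)) := by
        show (d.items.map (·.1)).map _ = _
        rw [List.map_map]; rfl
    _ = d.items.map (fun p => PySem.Int.toStr p.1 ++ ":" ++ PySem.Int.toStr p.2) := by
        refine List.map_congr_left (fun p hp => ?_)
        rw [PySem.Dict.getD_of_mem_items d (by exact (Prod.mk.eta (p := p)) ▸ hp) hnodup 0]
    _ = _ := by rw [hitems, List.map_map]; rfl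

-- ===== VERDICT (by name: the statement is the Claim_ definition above) =====
theorem feat_list_to_string_py_spec : Claim_equal_feat_list_to_string_py := by
  intro feat_list _
  exact feat_list_to_string_py_spec_aux feat_list
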